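-- pv_equiv track=rewrite | github.com/woodyjohnson13/gpt_api_bot | bot/test.py | cap_low
-- ===== SOURCE A (Python) =====
-- def cap_low(string):
--     index = len(string)
--     cap=""
--     low=""
--     for i in range(len(string)):
--         if i % 2 == 0:
--             cap = cap+ string[i].capitalize()
--         else:
--             low += string[i].lower()
--     return cap, low
-- ===== SOURCE B (Python) =====
-- def cap_low(string):
--     cap = "".join(c.capitalize() for c in string[::2])
--     low = "".join(c.lower() for c in string[1::2])
--     return cap, low
-- ===== Notes on version B (the rewrite author's own statement) =====
-- stated objective: idiomatic
-- what changed: Replaces the single index loop with an i%2 branch and incremental concatenation by two strided slices string[::2]/string[1::2], each mapped and joined in one comprehension.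
import Mathlib
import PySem

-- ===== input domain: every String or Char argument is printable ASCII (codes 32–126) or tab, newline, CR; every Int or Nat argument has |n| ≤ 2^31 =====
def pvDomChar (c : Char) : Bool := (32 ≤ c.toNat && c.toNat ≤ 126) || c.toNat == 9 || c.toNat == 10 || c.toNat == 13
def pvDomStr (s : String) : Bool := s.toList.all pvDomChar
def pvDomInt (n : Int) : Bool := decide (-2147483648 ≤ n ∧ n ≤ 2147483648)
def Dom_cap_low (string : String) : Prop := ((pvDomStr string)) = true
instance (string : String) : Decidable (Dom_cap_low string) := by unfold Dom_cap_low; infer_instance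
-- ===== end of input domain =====

-- B replaces A's index-parity loop by two strided slices (string[::2] and string[1::2]) joined per
-- character (idiomatic; same O(n) cost). Per-character str.capitalize()/str.lower() are ported as
-- upperChar/lowerChar: exact on one-character ASCII strings, the stated domain.

-- ===== PORT A =====
def cap_low (string : String) : String × String :=
  let cs := string.toList
  let r := (PySem.List.pyRange 0 (PySem.Chars.len cs) 1).foldl
    (fun (st : List Char × List Char) i =>
      if i % 2 == 0 then (st.1 ++ [PySem.Chars.upperChar (PySem.List.pyGetD cs i ' ')], st.2)
      else (st.1, st.2 ++ [PySem.Chars.lowerChar (PySem.List.pyGetD cs i ' ')]))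
    ([], [])
  (String.ofList r.1, String.ofList r.2)

-- ===== PORT B =====
def cap_low_alt (string : String) : String × String :=
  let cs := string.toList
  let evens := (PySem.List.slice? cs none none 2).getD []      -- string[::2]; step 2 ≠ 0, always some
  let odds := (PySem.List.slice? cs (some 1) none 2).getD []   -- string[1::2]
  (String.ofList (evens.map PySem.Chars.upperChar), String.ofList (odds.map PySem.Chars.lowerChar))

-- ===== PRECONDITION & SPEC =====
def Spec_cap_low (string : String) (out : String × String) : Prop := out = cap_low_alt string
instance (string : String) (out : String × String) : Decidable (Spec_cap_low string out) := by unfold Spec_cap_low; infer_instance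

-- ===== CLAIM (what is proved, stated in full; the proofs are below) =====
def Claim_equal_cap_low : Prop := ∀ (string : String), Dom_cap_low string → Spec_cap_low string (cap_low string)

-- ===== LEMMAS AND PROOFS =====

-- the elements of a list at even positions (.1) and odd positions (.2)
def pvEO {α : Type} : List α → List α × List α
  | [] => ([], [])
  | a :: t => (a :: (pvEO t).2, (pvEO t).1)

theorem pvFmEven {α : Type} : ∀ (xs : List α),
    (List.range ((xs.length + 1) / 2)).filterMap (fun k => xs[2 * k]?) = (pvEO xs).1
  | [] => by simp [pvEO]
  | [a] => by simp [pvEO]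
  | a :: b :: t => by
    have ih := pvFmEven t
    have hlen : ((a :: b :: t).length + 1) / 2 = (t.length + 1) / 2 + 1 := by
      simp [List.length_cons]; omega
    rw [hlen, List.range_succ_eq_map, List.filterMap_cons]
    simp only [List.filterMap_map]
    have hcong : ∀ k ∈ List.range ((t.length + 1) / 2),
        ((fun k => (a :: b :: t)[2 * k]?) ∘ (fun n => n + 1)) k = (fun k => t[2 * k]?) k := by
      intro k _
      show (a :: b :: t)[2 * (k + 1)]? = t[2 * k]?
      have h2 : 2 * (k + 1) = 2 * k + 1 + 1 := by ring
      rw [h2, List.getElem?_cons_succ, List.getElem?_cons_succ]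
    rw [List.filterMap_congr hcong, ih]
    simp [pvEO]

theorem pvFmOdd {α : Type} : ∀ (xs : List α),
    (List.range (xs.length / 2)).filterMap (fun k => xs[2 * k + 1]?) = (pvEO xs).2
  | [] => by simp [pvEO]
  | [a] => by simp [pvEO]
  | a :: b :: t => by
    have ih := pvFmOdd t
    have hlen : (a :: b :: t).length / 2 = t.length / 2 + 1 := by
      simp [List.length_cons]; omega
    rw [hlen, List.range_succ_eq_map, List.filterMap_cons]
    simp only [List.filterMap_map]
    have hcong : ∀ k ∈ List.range (t.length / 2),
        ((fun k => (a :: b :: t)[2 * k + 1]?) ∘ (fun n => n + 1)) k = (fun k => t[2 * k + 1]?) k := by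
      intro k _
      show (a :: b :: t)[2 * (k + 1) + 1]? = t[2 * k + 1]?
      have h2 : 2 * (k + 1) + 1 = (2 * k + 1) + 1 + 1 := by ring
      rw [h2, List.getElem?_cons_succ, List.getElem?_cons_succ]
    rw [List.filterMap_congr hcong, ih]
    simp [pvEO]

theorem pvSliceEven {α : Type} (xs : List α) :
    PySem.List.slice? xs none none 2 = some (pvEO xs).1 := by
  rw [← pvFmEven xs]
  simp only [PySem.List.slice?, PySem.List.sliceIndices]
  norm_num
  have hc : (if 0 < xs.length then (((xs.length : Int) + 2 - 1) / 2).toNat else 0)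
      = (xs.length + 1) / 2 := by
    split_ifs with h <;> omega
  rw [hc]
  apply List.filterMap_congr
  intro k _
  congr 1

theorem pvSliceOdd {α : Type} (xs : List α) :
    PySem.List.slice? xs (some 1) none 2 = some (pvEO xs).2 := by
  rw [← pvFmOdd xs]
  simp only [PySem.List.slice?, PySem.List.sliceIndices]
  norm_num
  cases xs with
  | nil => simp
  | cons a t =>
    have hm : min (1 : Int) ((a :: t).length : Int) = 1 := by
      simp [List.length_cons]
    simp only [hm]
    have hc : (if 1 < (a :: t).length then ((((a :: t).length : Int) - 1 + 2 - 1) / 2).toNat else 0)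
        = (a :: t).length / 2 := by
      simp only [List.length_cons]
      split_ifs with h <;> omega
    rw [hc]
    apply List.filterMap_congr
    intro k _
    congr 1
    omega

theorem pvEnumFold (l : List Char) : ∀ (s : Int) (cap low : List Char),
    (PySem.List.enumerate l s).foldl
      (fun (st : List Char × List Char) (p : Int × Char) =>
        if p.1 % 2 == 0 then (st.1 ++ [PySem.Chars.upperChar p.2], st.2)
        else (st.1, st.2 ++ [PySem.Chars.lowerChar p.2])) (cap, low)
    = if s % 2 == 0 then
        (cap ++ (pvEO l).1.map PySem.Chars.upperChar, low ++ (pvEO l).2.map PySem.Chars.lowerChar)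
      else
        (cap ++ (pvEO l).2.map PySem.Chars.upperChar, low ++ (pvEO l).1.map PySem.Chars.lowerChar) := by
  induction l with
  | nil => intro s cap low; simp [PySem.List.enumerate, pvEO]
  | cons c t ih =>
    intro s cap low
    rw [PySem.List.enumerate_cons]
    by_cases hs : s % 2 = 0
    · have h1 : (s % 2 == 0) = true := by simpa using hs
      have h2 : ((s + 1) % 2 == 0) = false := by
        simp only [beq_eq_false_iff_ne, ne_eq]
        omega
      simp only [List.foldl_cons, h1, if_true]
      rw [ih (s + 1)]
      simp [h2, pvEO]
    · have h1 : (s % 2 == 0) = false := by simpa using hs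
      have h2 : ((s + 1) % 2 == 0) = true := by
        simp only [beq_iff_eq]
        omega
      simp only [List.foldl_cons, h1]
      rw [ih (s + 1)]
      simp [h2, pvEO]

-- ===== VERDICT (by name: the statement is the Claim_ definition above) =====
theorem cap_low_spec : Claim_equal_cap_low := by
  intro string _
  show cap_low string = cap_low_alt string
  have hA := pvEnumFold string.toList 0 [] []
  rw [PySem.List.enumerate_eq_map_pyRange string.toList ' ', List.foldl_map] at hA
  simp only [show ((0 : Int) % 2 == 0) = true from rfl, if_true, List.nil_append] at hA
  simp only [cap_low, cap_low_alt, pvSliceEven, pvSliceOdd, Option.getD_some,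
    PySem.Chars.len, PySem.List.len] at *
  rw [hA]
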